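-- pv_equiv track=rewrite | github.com/eliottcassidy2000/math | 04-computation/general_n_closed_forms.py | sigma_const_and_t3
-- ===== SOURCE A (Python) =====
-- from math import factorial, comb
--
-- def sigma_const_and_t3(pattern, n):
--     """
--     Return (const, t3_coeff) for sigma(pattern) at general n.
--     Only works for patterns where the only non-trivial invariant is t3.
--     That is: all components are size 1 or exactly one component is size 2.
--     """
--     sizes = list(pattern)  # component sizes
--     total_verts = sum(s + 1 for s in sizes)
--     free = n - total_verts
--
--     if free < 0:
--         return (0, 0)
--
--     # Count how many size-1 components and size-2+ components
--     num_size1 = sizes.count(1)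
--     big_sizes = [s for s in sizes if s > 1]
--
--     if len(big_sizes) == 0:
--         # All size-1: sigma = (n-2k)! * n!/((n-2k)! * 2^k) = n!/2^k
--         k = len(sizes)
--         const = factorial(n) // (2**k)
--         return (const, 0)
--
--     if len(big_sizes) == 1 and big_sizes[0] == 2:
--         # One size-2 component (3 vertices) + num_size1 pairs
--         # sigma = (free)! * C(n-3, 2)^... no, need to be more careful
--         # G1 = 3-vertex group (for size-2), remaining groups are 2-vertex
--         # H(3-set) = 1 + 2*cyc, H(2-set) = 1
--         # sum over ordered (G1 of 3, G2 of 2, ..., Gm of 2, all disjoint from [n])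
--         # = [sum_{G1 in C(n,3)} H(T[G1])] * [C(n-3,2) * C(n-5,2) * ... ]
--         # = (C(n,3) + 2*t3) * prod_{i=0}^{num_size1-1} C(n-3-2i, 2)
--
--         pair_product = 1
--         remaining = n - 3
--         for i in range(num_size1):
--             pair_product *= comb(remaining, 2)
--             remaining -= 2
--
--         const = factorial(free) * comb(n, 3) * pair_product
--         t3_coeff = factorial(free) * 2 * pair_product
--         return (const, t3_coeff)
--
--     if len(big_sizes) == 1 and big_sizes[0] == 3:
--         # One size-3 component (4 vertices): H(4-set) = 1 + 2*c3(4-set)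
--         # sum_{4-subsets} H = C(n,4) + 2*(n-3)*t3
--         # (each 3-cycle is in (n-3) 4-subsets)
--         pair_product = 1
--         remaining = n - 4
--         for i in range(num_size1):
--             pair_product *= comb(remaining, 2)
--             remaining -= 2
--
--         const = factorial(free) * comb(n, 4) * pair_product
--         t3_coeff = factorial(free) * 2 * (n - 3) * pair_product
--         return (const, t3_coeff)
--
--     # For other patterns, return None to indicate we need more invariants
--     return None
-- ===== SOURCE B (Python) =====
-- from math import factorial, comb
--
-- def sigma_const_and_t3(pattern, n):
--     sizes = list(pattern)
--     free = n - sum(s + 1 for s in sizes)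
--     if free < 0:
--         return (0, 0)
--     k1 = sizes.count(1)
--     big = [s for s in sizes if s > 1]
--     if not big:
--         return (factorial(n) // 2 ** len(sizes), 0)
--     if len(big) == 1 and big[0] in (2, 3):
--         v = big[0] + 1          # vertices used by the one big component
--         m = n - v
--         # closed form for prod_{i<k1} C(m-2i, 2): a falling factorial over 2^k1
--         if k1 == 0:
--             pp = 1              # empty product
--         elif m >= 2 * k1:
--             pp = factorial(m) // factorial(m - 2 * k1) // 2 ** k1
--         else:
--             pp = 0              # some factor C(0,2) or C(1,2) vanishes
--         f = factorial(free)
--         const = f * comb(n, v) * pp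
--         t3 = f * 2 * pp * (1 if v == 3 else n - 3)
--         return (const, t3)
--     return None
-- ===== Notes on version B (the rewrite author's own statement) =====
-- stated objective: simpler
-- what changed: The two pair_product accumulation loops over comb(remaining,2) are replaced by one merged size-2/size-3 branch computing the product in closed form as a falling factorial, factorial(m)//factorial(m-2*k1)//2**k1 (0 when a factor vanishes, 1 for the empty product), so B contains no loop at all.
import Mathlib
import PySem

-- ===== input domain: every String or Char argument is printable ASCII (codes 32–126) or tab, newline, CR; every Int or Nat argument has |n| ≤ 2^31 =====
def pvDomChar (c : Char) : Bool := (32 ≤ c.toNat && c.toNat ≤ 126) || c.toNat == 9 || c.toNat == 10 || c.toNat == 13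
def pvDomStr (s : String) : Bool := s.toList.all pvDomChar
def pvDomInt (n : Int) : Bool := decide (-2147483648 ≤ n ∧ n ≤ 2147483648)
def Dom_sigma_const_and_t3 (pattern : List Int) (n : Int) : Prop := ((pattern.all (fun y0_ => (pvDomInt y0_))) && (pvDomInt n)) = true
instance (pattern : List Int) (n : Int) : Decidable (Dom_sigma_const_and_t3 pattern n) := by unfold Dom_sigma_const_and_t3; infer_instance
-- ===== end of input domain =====

-- B replaces A's two pair_product accumulation loops by one merged branch with a
-- closed-form falling factorial (objective: simpler); equivalence is proved on Pre_,
-- which excludes exactly the inputs where A raises ValueError.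

-- math.factorial / math.comb, exact on the nonnegative arguments Pre_ admits
-- (Python raises ValueError on a negative argument; Pre_ excludes those calls).
def pyFactorial (n : Int) : Int := (Nat.factorial n.toNat : Int)
def pyComb (n k : Int) : Int := (Nat.choose n.toNat k.toNat : Int)

-- ===== PORT A =====
def sigma_const_and_t3 (pattern : List Int) (n : Int) : Option (Int × Int) :=
  let sizes := pattern
  let total_verts := (sizes.map (· + 1)).sum
  let free := n - total_verts
  if free < 0 then some (0, 0) else
  let num_size1 := sizes.count 1
  let big_sizes := sizes.filter (fun s => 1 < s)
  if big_sizes.length = 0 then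
    let k := sizes.length
    let const := PySem.Int.floordiv (pyFactorial n) (2 ^ k)
    some (const, 0)
  else if big_sizes.length = 1 ∧ big_sizes.headD 0 = 2 then
    let st := (List.range num_size1).foldl
      (fun (st : Int × Int) _ => (st.1 * pyComb st.2 2, st.2 - 2)) (1, n - 3)
    let pair_product := st.1
    some (pyFactorial free * pyComb n 3 * pair_product,
          pyFactorial free * 2 * pair_product)
  else if big_sizes.length = 1 ∧ big_sizes.headD 0 = 3 then
    let st := (List.range num_size1).foldl
      (fun (st : Int × Int) _ => (st.1 * pyComb st.2 2, st.2 - 2)) (1, n - 4)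
    let pair_product := st.1
    some (pyFactorial free * pyComb n 4 * pair_product,
          pyFactorial free * 2 * (n - 3) * pair_product)
  else none

-- ===== PORT B =====
def sigma_const_and_t3_alt (pattern : List Int) (n : Int) : Option (Int × Int) :=
  let sizes := pattern
  let free := n - (sizes.map (· + 1)).sum
  if free < 0 then some (0, 0) else
  let k1 := sizes.count 1
  let big := sizes.filter (fun s => 1 < s)
  if big = [] then
    some (PySem.Int.floordiv (pyFactorial n) (2 ^ sizes.length), 0)
  else if big.length = 1 ∧ (big.headD 0 = 2 ∨ big.headD 0 = 3) then
    let v := big.headD 0 + 1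
    let m := n - v
    let pp : Int :=
      if k1 = 0 then 1
      else if 2 * (k1 : Int) ≤ m then
        PySem.Int.floordiv (PySem.Int.floordiv (pyFactorial m) (pyFactorial (m - 2 * (k1 : Int)))) (2 ^ k1)
      else 0
    let f := pyFactorial free
    some (f * pyComb n v * pp, f * 2 * pp * (if v = 3 then 1 else n - 3))
  else none

-- ===== PRECONDITION & SPEC =====
-- Pre_ excludes exactly the inputs where A raises ValueError: factorial(n) with
-- n < 0 in the all-size-1 branch, comb(n, v) with n < 0, or comb(remaining, 2)
-- with remaining < 0 at some loop iteration in the size-2/size-3 branches.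
def Pre_sigma_const_and_t3 (pattern : List Int) (n : Int) : Prop :=
  let free := n - (pattern.map (· + 1)).sum
  let k1 := pattern.count 1
  let big := pattern.filter (fun s => 1 < s)
  free < 0 ∨
  (big = [] ∧ 0 ≤ n) ∨
  ((big = [2] ∨ big = [3]) ∧ 0 ≤ n ∧
    (k1 = 0 ∨ 0 ≤ n - (big.headD 0 + 1) - 2 * ((k1 : Int) - 1))) ∨
  (big ≠ [] ∧ big ≠ [2] ∧ big ≠ [3])
instance (pattern : List Int) (n : Int) : Decidable (Pre_sigma_const_and_t3 pattern n) := by unfold Pre_sigma_const_and_t3; infer_instance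
def pvWitness_sigma_const_and_t3 : List Int × Int := ([2, 1], 7)

def Spec_sigma_const_and_t3 (pattern : List Int) (n : Int) (out : Option (Int × Int)) : Prop := out = sigma_const_and_t3_alt pattern n
instance (pattern : List Int) (n : Int) (out : Option (Int × Int)) : Decidable (Spec_sigma_const_and_t3 pattern n out) := by unfold Spec_sigma_const_and_t3; infer_instance

-- ===== CLAIM (what is proved, stated in full; the proofs are below) =====
def Claim_equal_sigma_const_and_t3 : Prop := ∀ (pattern : List Int) (n : Int), Dom_sigma_const_and_t3 pattern n → Pre_sigma_const_and_t3 pattern n → Spec_sigma_const_and_t3 pattern n (sigma_const_and_t3 pattern n)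

-- ===== LEMMAS AND PROOFS =====

-- the product A's loop accumulates, as a function of the start value and the trip count
def gprod (m : Int) (k : Nat) : Int :=
  (List.range k).foldl (fun acc (i : Nat) => acc * pyComb (m - 2 * (i : Int)) 2) 1

theorem gprod_succ (m : Int) (k : Nat) :
    gprod m (k + 1) = gprod m k * pyComb (m - 2 * (k : Int)) 2 := by
  unfold gprod
  rw [List.range_succ, List.foldl_append]
  simp

-- A's loop state after k iterations
theorem loop_eq (m : Int) (k : Nat) :
    ((List.range k).foldl (fun (st : Int × Int) _ => (st.1 * pyComb st.2 2, st.2 - 2)) (1, m)) =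
    (gprod m k, m - 2 * (k : Int)) := by
  induction k with
  | zero => simp [gprod]
  | succ k ih =>
    rw [List.range_succ, List.foldl_append, ih, gprod_succ]
    simp only [List.foldl_cons, List.foldl_nil, Prod.mk.injEq]
    refine ⟨trivial, ?_⟩
    push_cast; ring

theorem chooseTwoMul (a : Nat) : Nat.choose a 2 * 2 = a * (a - 1) := by
  induction a with
  | zero => simp
  | succ a ih =>
    rw [Nat.choose_succ_succ, Nat.add_mul, ih, Nat.choose_one_right]
    rcases a with _ | b
    · simp
    · simp only [Nat.add_sub_cancel]
      ring

-- the Nat-level product of C(M-2i, 2), i < k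
def pnat (M : Nat) (k : Nat) : Nat :=
  (List.range k).foldl (fun acc (i : Nat) => acc * Nat.choose (M - 2 * i) 2) 1

theorem pnat_succ (M k : Nat) :
    pnat M (k + 1) = pnat M k * Nat.choose (M - 2 * k) 2 := by
  unfold pnat
  rw [List.range_succ, List.foldl_append]
  simp

theorem prod_falling (M k : Nat) (h : 2 * k ≤ M) :
    pnat M k * (Nat.factorial (M - 2 * k) * 2 ^ k) = Nat.factorial M := by
  induction k with
  | zero => simp [pnat]
  | succ k ih =>
    rw [pnat_succ]
    have hstep : Nat.choose (M - 2 * k) 2 * (Nat.factorial (M - 2 * (k + 1)) * 2) = Nat.factorial (M - 2 * k) := by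
      have ha : M - 2 * k = (M - 2 * (k + 1)) + 2 := by omega
      rw [ha]
      set a := M - 2 * (k + 1)
      have h2 : Nat.choose (a + 2) 2 * 2 = (a + 2) * (a + 1) := by
        rw [chooseTwoMul]
        congr 1
      calc Nat.choose (a + 2) 2 * (Nat.factorial a * 2)
          = (Nat.choose (a + 2) 2 * 2) * Nat.factorial a := by ring
        _ = (a + 2) * (a + 1) * Nat.factorial a := by rw [h2]
        _ = (a + 2) * ((a + 1) * Nat.factorial a) := by ring
        _ = (a + 2) * Nat.factorial (a + 1) := by rw [Nat.factorial_succ]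
        _ = Nat.factorial (a + 2) := by rw [Nat.factorial_succ (a + 1)]
    calc pnat M k * Nat.choose (M - 2 * k) 2 * (Nat.factorial (M - 2 * (k + 1)) * 2 ^ (k + 1))
        = pnat M k * ((Nat.choose (M - 2 * k) 2 * (Nat.factorial (M - 2 * (k + 1)) * 2)) * 2 ^ k) := by ring
      _ = pnat M k * (Nat.factorial (M - 2 * k) * 2 ^ k) := by rw [hstep]
      _ = Nat.factorial M := ih (by omega)

-- gprod is the cast of pnat as long as every factor's first argument is ≥ 0
theorem gprod_cast (M : Nat) (k : Nat) (h : 2 * (k : Int) - 2 ≤ (M : Int)) :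
    gprod (M : Int) k = (pnat M k : Int) := by
  induction k with
  | zero => simp [gprod, pnat]
  | succ k ih =>
    rw [gprod_succ, pnat_succ, ih (by omega)]
    have harg : ((M : Int) - 2 * (k : Int)).toNat = M - 2 * k := by omega
    unfold pyComb
    rw [harg]
    push_cast
    ring

-- A's loop product equals B's closed form, given k ≠ 0 and the last remaining ≥ 0
theorem prod_closed (m : Int) (k : Nat) (hk : k ≠ 0) (hlast : 0 ≤ m - 2 * ((k : Int) - 1)) :
    gprod m k =
    (if 2 * (k : Int) ≤ m then
      PySem.Int.floordiv (PySem.Int.floordiv (pyFactorial m) (pyFactorial (m - 2 * (k : Int)))) (2 ^ k)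
     else 0) := by
  have hm0 : 0 ≤ m := by omega
  obtain ⟨M, rfl⟩ := Int.eq_ofNat_of_zero_le hm0
  by_cases hle : 2 * (k : Int) ≤ (M : Int)
  · rw [if_pos hle, gprod_cast M k (by omega)]
    have hMk : 2 * k ≤ M := by exact_mod_cast hle
    have h1 : pyFactorial (M : Int) = (Nat.factorial M : Int) := by
      unfold pyFactorial; simp
    have h2 : pyFactorial ((M : Int) - 2 * (k : Int)) = (Nat.factorial (M - 2 * k) : Int) := by
      unfold pyFactorial
      have harg : ((M : Int) - 2 * (k : Int)).toNat = M - 2 * k := by omega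
      rw [harg]
    rw [h1, h2]
    have key := prod_falling M k hMk
    have hpos1 : (0 : Int) < (Nat.factorial (M - 2 * k) : Int) := by exact_mod_cast Nat.factorial_pos _
    have hpos2 : (0 : Int) < (2 : Int) ^ k := by positivity
    have hfac : (Nat.factorial M : Int) = ((pnat M k : Int) * 2 ^ k) * (Nat.factorial (M - 2 * k) : Int) := by
      rw [← key]; push_cast; ring
    rw [PySem.Int.floordiv_eq_ediv_of_pos hpos1, hfac, Int.mul_ediv_cancel _ hpos1.ne',
      PySem.Int.floordiv_eq_ediv_of_pos hpos2, Int.mul_ediv_cancel _ hpos2.ne']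
  · rw [if_neg hle]
    obtain ⟨j, rfl⟩ := Nat.exists_eq_succ_of_ne_zero hk
    rw [gprod_succ]
    have hzero : pyComb ((M : Int) - 2 * (j : Int)) 2 = 0 := by
      unfold pyComb
      have hlt : ((M : Int) - 2 * (j : Int)).toNat < ((2 : Int)).toNat := by
        push_cast at hle hlast ⊢; omega
      rw [Nat.choose_eq_zero_of_lt hlt]
      rfl
    rw [hzero, mul_zero]

theorem sigma_eq (pattern : List Int) (n : Int) (h : Pre_sigma_const_and_t3 pattern n) :
    sigma_const_and_t3 pattern n = sigma_const_and_t3_alt pattern n := by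
  unfold sigma_const_and_t3 sigma_const_and_t3_alt
  unfold Pre_sigma_const_and_t3 at h
  simp only at h ⊢
  set big := pattern.filter (fun s => 1 < s) with hbigdef
  set k1 := pattern.count 1 with hk1def
  by_cases hfree : n - (pattern.map (· + 1)).sum < 0
  · simp only [if_pos hfree]
  · simp only [if_neg hfree]
    by_cases hnil : big = []
    · simp [hnil]
    · have hlen0 : ¬ big.length = 0 := by simpa [List.length_eq_zero_iff] using hnil
      rw [if_neg hlen0, if_neg hnil]
      rcases h with h | ⟨h, _⟩ | ⟨hb23, _, hk⟩ | ⟨_, hne2, hne3⟩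
      · exact absurd h hfree
      · exact absurd h hnil
      · -- big = [2] or big = [3]
        rcases hb23 with hb | hb
        · -- size-2 branch
          have hc : big.length = 1 ∧ big.headD 0 = 2 := by rw [hb]; exact ⟨rfl, rfl⟩
          rw [if_pos hc, if_pos ⟨hc.1, Or.inl hc.2⟩, loop_eq]
          simp only [hb, List.headD_cons] at hk ⊢
          by_cases hk10 : k1 = 0
          · simp [hk10, gprod]
          · rw [if_neg hk10]
            rcases hk with hk | hk
            · exact absurd hk hk10
            · have hpp := prod_closed (n - 3) k1 hk10 (by push_cast at hk ⊢; omega)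
              have harg : n - (2 + 1) = n - 3 := by ring
              rw [harg, hpp]
              split <;> simp
        · -- size-3 branch
          have hc3 : big.length = 1 ∧ big.headD 0 = 3 := by rw [hb]; exact ⟨rfl, rfl⟩
          have hc2 : ¬ (big.length = 1 ∧ big.headD 0 = 2) := by
            rw [hb]; rintro ⟨-, hh⟩; simp at hh
          rw [if_neg hc2, if_pos hc3, if_pos ⟨hc3.1, Or.inr hc3.2⟩, loop_eq]
          simp only [hb, List.headD_cons] at hk ⊢
          by_cases hk10 : k1 = 0
          · simp [hk10, gprod]
          · rw [if_neg hk10]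
            rcases hk with hk | hk
            · exact absurd hk hk10
            · have hpp := prod_closed (n - 4) k1 hk10 (by push_cast at hk ⊢; omega)
              have harg : n - (3 + 1) = n - 4 := by ring
              rw [harg, hpp]
              split <;> simp <;> try ring
      · -- neither [2] nor [3]: both return none
        have hc2 : ¬ (big.length = 1 ∧ big.headD 0 = 2) := by
          rintro ⟨hl, hh⟩
          rcases big with - | ⟨x, t⟩
          · exact hnil rfl
          · have : t = [] := by simpa using hl
            subst this; simp at hh; exact hne2 (by rw [hh])
        have hc3 : ¬ (big.length = 1 ∧ big.headD 0 = 3) := by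
          rintro ⟨hl, hh⟩
          rcases big with - | ⟨x, t⟩
          · exact hnil rfl
          · have : t = [] := by simpa using hl
            subst this; simp at hh; exact hne3 (by rw [hh])
        have hcB : ¬ (big.length = 1 ∧ (big.headD 0 = 2 ∨ big.headD 0 = 3)) := by
          rintro ⟨hl, hh | hh⟩
          · exact hc2 ⟨hl, hh⟩
          · exact hc3 ⟨hl, hh⟩
        rw [if_neg hc2, if_neg hc3, if_neg hcB]

-- ===== VERDICT (by name: the statement is the Claim_ definition above) =====
theorem sigma_const_and_t3_spec : Claim_equal_sigma_const_and_t3 := by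
  intro pattern n _ hpre
  exact sigma_eq pattern n hpre
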